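-- pv_equiv track=rewrite | github.com/E-stab21/Scrabble-Assistant | Scrabble but better.py | state_indexing
-- ===== SOURCE A (Python) =====
-- import copy
--
-- LETTERS = ['a', 'b', 'c', 'd', 'e', 'f', 'g', 'h', 'i', 'j', 'k', 'l', 'm', 'n', 'o',
--            'p', 'q', 'r', 's', 't', 'u', 'v', 'w', 'x', 'y', 'z']
--
-- def state_indexing(game_state_):
--     given_letter_pos = []
--     surounding_pos = []
--     for row_num, row in enumerate(game_state_):
--         for colum, letter in enumerate(row):
--             if letter in LETTERS:
--                 given_letter_pos.append((row_num , colum))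
--                 for adj in [-1, 1]:
--                     if (row_num + adj <= 14):
--                         surounding_pos.append((row_num + adj, colum))
--                     if (colum + adj <= 14):
--                         surounding_pos.append((row_num, colum + adj))
--
--     sur_filter_pos = copy.deepcopy(surounding_pos)
--     for index, item in enumerate(surounding_pos):
--         if item in given_letter_pos:
--             sur_filter_pos.pop(sur_filter_pos.index(item))
--
--     return given_letter_pos, sur_filter_pos
-- ===== SOURCE B (Python) =====
-- LETTERS = ['a', 'b', 'c', 'd', 'e', 'f', 'g', 'h', 'i', 'j', 'k', 'l', 'm', 'n', 'o',
--            'p', 'q', 'r', 's', 't', 'u', 'v', 'w', 'x', 'y', 'z']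
--
-- def state_indexing(game_state_):
--     # Pass 1: collect all letter cells once.
--     letter_pos = []
--     for r, row in enumerate(game_state_):
--         for c, ch in enumerate(row):
--             if ch in LETTERS:
--                 letter_pos.append((r, c))
--     letter_set = set(letter_pos)
--     # Pass 2: emit neighbours directly from the collected positions,
--     # filtering at generation time -- no candidate copy, no pop pass.
--     sur = []
--     for r, c in letter_pos:
--         for adj in (-1, 1):
--             if r + adj <= 14 and (r + adj, c) not in letter_set:
--                 sur.append((r + adj, c))
--             if c + adj <= 14 and (r, c + adj) not in letter_set:
--                 sur.append((r, c + adj))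
--     return letter_pos, sur
-- ===== Notes on version B (the rewrite author's own statement) =====
-- stated objective: simpler
-- what changed: B replaces A's build-all-candidates-then-deepcopy-and-pop filter pass (list membership plus .index/.pop per candidate) by a second loop over the collected letter positions that filters each neighbour at generation time against a set of letter positions.
import Mathlib
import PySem

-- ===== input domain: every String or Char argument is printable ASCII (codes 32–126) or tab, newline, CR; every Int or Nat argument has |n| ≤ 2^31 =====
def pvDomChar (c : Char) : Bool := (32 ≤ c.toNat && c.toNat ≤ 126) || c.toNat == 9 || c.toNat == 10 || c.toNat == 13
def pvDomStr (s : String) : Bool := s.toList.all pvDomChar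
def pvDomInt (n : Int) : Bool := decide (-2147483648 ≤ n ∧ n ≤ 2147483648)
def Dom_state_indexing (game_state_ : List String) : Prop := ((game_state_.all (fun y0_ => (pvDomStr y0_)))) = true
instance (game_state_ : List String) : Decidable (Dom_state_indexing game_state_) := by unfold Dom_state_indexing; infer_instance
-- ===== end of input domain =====

-- B drops A's deepcopy-and-pop filtering pass: it collects the letter cells once and
-- emits neighbour cells directly from that list, filtering at generation time via a set
-- (objective: simpler — no intermediate candidate list, no copy, no pop pass).

-- ===== PORT A =====
def pvLETTERS : List Char :=
  ['a','b','c','d','e','f','g','h','i','j','k','l','m',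
   'n','o','p','q','r','s','t','u','v','w','x','y','z']

-- body of A's 'for adj in [-1, 1]' loop
def pvAdjStepA (rn col : Int) (st4 : List (Int × Int) × List (Int × Int)) (adj : Int) :
    List (Int × Int) × List (Int × Int) :=
  let st5 := if rn + adj ≤ 14 then (st4.1, st4.2 ++ [(rn + adj, col)]) else st4
  if col + adj ≤ 14 then (st5.1, st5.2 ++ [(rn, col + adj)]) else st5

-- body of A's inner 'for colum, letter in enumerate(row)' loop
def pvColStepA (rn : Int) (st2 : List (Int × Int) × List (Int × Int)) (cl : Int × Char) :
    List (Int × Int) × List (Int × Int) :=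
  if cl.2 ∈ pvLETTERS then
    [(-1 : Int), 1].foldl (pvAdjStepA rn cl.1) (st2.1 ++ [(rn, cl.1)], st2.2)
  else st2

-- body of A's outer 'for row_num, row in enumerate(game_state_)' loop
def pvRowStepA (st : List (Int × Int) × List (Int × Int)) (rw : Int × String) :
    List (Int × Int) × List (Int × Int) :=
  (PySem.List.enumerate rw.2.toList).foldl (pvColStepA rw.1) st

-- step of A's filter loop body: sur_filter_pos.pop(sur_filter_pos.index(item)) when item ∈ given_letter_pos.
-- The 'none' fallbacks are unreachable in A's run (item is drawn from surounding_pos, all of whose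
-- occurrences are still present when it is processed), so Python never raises here.
def pvFilterStep (lp : List (Int × Int)) (sfp : List (Int × Int)) (item : Int × Int) :
    List (Int × Int) :=
  if item ∈ lp then
    match PySem.List.index? sfp item with
    | some i =>
      match PySem.List.pop? sfp (i : Int) with
      | some r => r.2
      | none => sfp
    | none => sfp
  else sfp

def state_indexing (game_state_ : List String) : (List (Int × Int)) × (List (Int × Int)) :=
  let st := (PySem.List.enumerate game_state_).foldl pvRowStepA
      (([] : List (Int × Int)), ([] : List (Int × Int)))
  let sur_filter_pos := st.2.foldl (pvFilterStep st.1) st.2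
  (st.1, sur_filter_pos)

-- ===== PORT B =====
-- pass 1, inner loop body: collect a letter cell
def pvColStepB (rn : Int) (acc2 : List (Int × Int)) (cl : Int × Char) : List (Int × Int) :=
  if cl.2 ∈ pvLETTERS then acc2 ++ [((rn, cl.1) : Int × Int)] else acc2

def pvRowStepB (acc : List (Int × Int)) (rw : Int × String) : List (Int × Int) :=
  (PySem.List.enumerate rw.2.toList).foldl (pvColStepB rw.1) acc

-- pass 2, 'for adj in (-1, 1)' body: emit a neighbour only when in bounds and not a letter cell
def pvAdjStepB (letter_set : PySem.Set (Int × Int)) (r c : Int) (a2 : List (Int × Int))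
    (adj : Int) : List (Int × Int) :=
  let a3 := if r + adj ≤ 14 ∧ (r + adj, c) ∉ letter_set then a2 ++ [((r + adj, c) : Int × Int)] else a2
  if c + adj ≤ 14 ∧ (r, c + adj) ∉ letter_set then a3 ++ [((r, c + adj) : Int × Int)] else a3

def pvPosStepB (letter_set : PySem.Set (Int × Int)) (acc : List (Int × Int)) (rc : Int × Int) :
    List (Int × Int) :=
  [(-1 : Int), 1].foldl (pvAdjStepB letter_set rc.1 rc.2) acc

def state_indexing_alt (game_state_ : List String) : (List (Int × Int)) × (List (Int × Int)) :=
  let letter_pos := (PySem.List.enumerate game_state_).foldl pvRowStepB ([] : List (Int × Int))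
  let letter_set := PySem.Set.ofList letter_pos
  let sur := letter_pos.foldl (pvPosStepB letter_set) ([] : List (Int × Int))
  (letter_pos, sur)

-- ===== PRECONDITION & SPEC =====
def Spec_state_indexing (game_state_ : List String) (out : (List (Int × Int)) × (List (Int × Int))) : Prop := out = state_indexing_alt game_state_
instance (game_state_ : List String) (out : (List (Int × Int)) × (List (Int × Int))) : Decidable (Spec_state_indexing game_state_ out) := by unfold Spec_state_indexing; infer_instance

-- ===== CLAIM (what is proved, stated in full; the proofs are below) =====
def Claim_equal_state_indexing : Prop := ∀ (game_state_ : List String), Dom_state_indexing game_state_ → Spec_state_indexing game_state_ (state_indexing game_state_)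

-- ===== LEMMAS AND PROOFS =====

-- the unfiltered neighbour candidates one letter cell (r, c) contributes, in A's emission order
def pvCand (r c : Int) : List (Int × Int) :=
  (if r - 1 ≤ 14 then [(r - 1, c)] else []) ++
  (if c - 1 ≤ 14 then [(r, c - 1)] else []) ++
  (if r + 1 ≤ 14 then [(r + 1, c)] else []) ++
  (if c + 1 ≤ 14 then [(r, c + 1)] else [])

-- the letter positions contributed by one row
def pvRowPos (rn : Int) (row : List (Int × Char)) : List (Int × Int) :=
  row.filterMap (fun cl => if cl.2 ∈ pvLETTERS then some ((rn, cl.1) : Int × Int) else none)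

-- all letter positions of the board
def pvPos (gs : List (Int × String)) : List (Int × Int) :=
  gs.flatMap (fun rw => pvRowPos rw.1 (PySem.List.enumerate rw.2.toList))

theorem pvA_adj (r c : Int) (st : List (Int × Int) × List (Int × Int)) :
    [(-1 : Int), 1].foldl (pvAdjStepA r c) st = (st.1, st.2 ++ pvCand r c) := by
  simp only [List.foldl, pvAdjStepA, pvCand]
  have h1 : r + -1 = r - 1 := by ring
  have h2 : c + -1 = c - 1 := by ring
  rw [h1, h2]
  split_ifs <;> simp

theorem pvA_row (rn : Int) (row : List (Int × Char)) (st : List (Int × Int) × List (Int × Int)) :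
    row.foldl (pvColStepA rn) st
    = (st.1 ++ pvRowPos rn row,
       st.2 ++ (pvRowPos rn row).flatMap (fun p => pvCand p.1 p.2)) := by
  induction row generalizing st with
  | nil => simp [pvRowPos]
  | cons cl rest ih =>
    rw [List.foldl_cons, ih]
    by_cases h : cl.2 ∈ pvLETTERS
    · rw [pvColStepA, if_pos h, pvA_adj rn cl.1 (st.1 ++ [(rn, cl.1)], st.2)]
      simp [pvRowPos, h]
    · rw [pvColStepA, if_neg h]
      simp [pvRowPos, h]

theorem pvA_phase1 (gs : List (Int × String)) (st : List (Int × Int) × List (Int × Int)) :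
    gs.foldl pvRowStepA st
    = (st.1 ++ pvPos gs, st.2 ++ (pvPos gs).flatMap (fun p => pvCand p.1 p.2)) := by
  induction gs generalizing st with
  | nil => simp [pvPos]
  | cons rw_ rest ih =>
    rw [List.foldl_cons, ih, pvRowStepA, pvA_row]
    simp [pvPos]

-- A's filter step is the identity on items that are not letter positions
theorem pvFilterStep_not_mem (lp sfp : List (Int × Int)) (x : Int × Int) (h : x ∉ lp) :
    pvFilterStep lp sfp x = sfp := by
  unfold pvFilterStep
  rw [if_neg h]

-- on a letter position, A's filter step pops the first occurrence
theorem pvFilterStep_mem (lp pref suf : List (Int × Int)) (x : Int × Int)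
    (h : x ∈ lp) (hpref : x ∉ pref) :
    pvFilterStep lp (pref ++ x :: suf) x = pref ++ suf := by
  unfold pvFilterStep
  rw [if_pos h]
  have hidx : PySem.List.index? (pref ++ x :: suf) x = some pref.length := by
    rw [PySem.List.index?_eq_some_iff]
    exact ⟨pref, suf, rfl, rfl, hpref⟩
  rw [hidx]
  have hlt : pref.length < (pref ++ x :: suf).length := by simp
  have herase : ∀ (pr : List (Int × Int)), (pr ++ x :: suf).eraseIdx pr.length = pr ++ suf := by
    intro pr
    induction pr with
    | nil => simp
    | cons a t iht => simpa using iht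
  simp [PySem.List.pop?_natCast _ _ hlt, herase]

-- A's filter loop removes exactly the occurrences of letter positions, in order
theorem pvFilter_loop (lp : List (Int × Int)) :
    ∀ (rest pref : List (Int × Int)), (∀ x ∈ pref, x ∉ lp) →
      rest.foldl (pvFilterStep lp) (pref ++ rest) =
        pref ++ rest.filter (fun p => decide (p ∉ lp)) := by
  intro rest
  induction rest with
  | nil => intro pref _; simp
  | cons x xs ih =>
    intro pref hpref
    rw [List.foldl_cons]
    by_cases h : x ∈ lp
    · have hxp : x ∉ pref := fun hx => (hpref x hx) h
      rw [pvFilterStep_mem lp pref xs x h hxp, ih pref hpref]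
      simp [h]
    · rw [pvFilterStep_not_mem lp _ x h]
      have hsplit : pref ++ x :: xs = (pref ++ [x]) ++ xs := by simp
      rw [hsplit, ih (pref ++ [x])]
      · simp [h]
      · intro y hy
        rcases List.mem_append.mp hy with hy | hy
        · exact hpref y hy
        · simp_all

-- the whole filter loop started on the full list
theorem pvFilter_all (lp l : List (Int × Int)) :
    l.foldl (pvFilterStep lp) l = l.filter (fun p => decide (p ∉ lp)) := by
  have := pvFilter_loop lp l [] (by simp)
  simpa using this

theorem pvA_eq (gs : List String) :
    state_indexing gs =
      (pvPos (PySem.List.enumerate gs),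
       ((pvPos (PySem.List.enumerate gs)).flatMap (fun p => pvCand p.1 p.2)).filter
         (fun p => decide (p ∉ pvPos (PySem.List.enumerate gs)))) := by
  unfold state_indexing
  rw [pvA_phase1]
  simp only [List.nil_append]
  rw [pvFilter_all]

-- B's letter-collecting pass computes pvPos
theorem pvB_row (rn : Int) (row : List (Int × Char)) (acc : List (Int × Int)) :
    row.foldl (pvColStepB rn) acc = acc ++ pvRowPos rn row := by
  induction row generalizing acc with
  | nil => simp [pvRowPos]
  | cons cl rest ih =>
    rw [List.foldl_cons, ih]
    by_cases h : cl.2 ∈ pvLETTERS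
    · rw [pvColStepB, if_pos h]; simp [pvRowPos, h]
    · rw [pvColStepB, if_neg h]; simp [pvRowPos, h]

theorem pvB_phase1 (gs : List (Int × String)) (acc : List (Int × Int)) :
    gs.foldl pvRowStepB acc = acc ++ pvPos gs := by
  induction gs generalizing acc with
  | nil => simp [pvPos]
  | cons rw_ rest ih =>
    rw [List.foldl_cons, ih, pvRowStepB, pvB_row]
    simp [pvPos]

-- pulling a conditional append apart
theorem pvCondAppend {α : Type} (cond : Prop) [Decidable cond] (l : List α) (x : α) :
    (if cond then l ++ [x] else l) = l ++ (if cond then [x] else []) := by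
  split_ifs <;> simp

-- filtering a conditional singleton
theorem pvFilterSingle {α : Type} (p : α → Bool) (b : Prop) [Decidable b] (x : α) :
    List.filter p (if b then [x] else []) = if b ∧ p x = true then [x] else [] := by
  split_ifs <;> simp_all

-- B's per-letter emission is the filtered candidate list
theorem pvB_adj (lp : List (Int × Int)) (r c : Int) (acc : List (Int × Int)) :
    [(-1 : Int), 1].foldl (pvAdjStepB (PySem.Set.ofList lp) r c) acc
      = acc ++ (pvCand r c).filter (fun p => decide (p ∉ lp)) := by
  have h1 : r + -1 = r - 1 := by ring
  have h2 : c + -1 = c - 1 := by ring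
  simp only [List.foldl, pvAdjStepB, pvCand, h1, h2, pvCondAppend, List.filter_append,
    pvFilterSingle, PySem.Set.mem_ofList, decide_eq_true_eq, List.append_assoc]
  split_ifs <;> simp

theorem pvB_phase2 (lp : List (Int × Int)) (l acc : List (Int × Int)) :
    l.foldl (pvPosStepB (PySem.Set.ofList lp)) acc
    = acc ++ l.flatMap (fun p => (pvCand p.1 p.2).filter (fun q => decide (q ∉ lp))) := by
  induction l generalizing acc with
  | nil => simp
  | cons p rest ih =>
    rw [List.foldl_cons, pvPosStepB, pvB_adj, ih]
    simp

theorem pvB_eq (gs : List String) :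
    state_indexing_alt gs =
      (pvPos (PySem.List.enumerate gs),
       ((pvPos (PySem.List.enumerate gs)).flatMap (fun p => pvCand p.1 p.2)).filter
         (fun p => decide (p ∉ pvPos (PySem.List.enumerate gs)))) := by
  unfold state_indexing_alt
  rw [pvB_phase1]
  simp only [List.nil_append]
  rw [pvB_phase2]
  simp [List.filter_flatMap]

-- ===== VERDICT (by name: the statement is the Claim_ definition above) =====
theorem state_indexing_spec : Claim_equal_state_indexing := by
  intro gs _
  unfold Spec_state_indexing
  rw [pvA_eq, pvB_eq]
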